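-- pv_equiv track=rewrite | github.com/lyijin/common | reverse_complement.py | rc_tabseparated
-- ===== SOURCE A (Python) =====
-- def rc_single(seq):
--     seq = seq.replace('U', 'T')
--
--     translation_from = 'AaTtGgCcYyRrSsWwKkMmBbDdHhVvNn'
--     translation_to   = 'TtAaCcGgRrYySsWwMmKkVvHhDdBbNn'
--     translation_table = str.maketrans(translation_from, translation_to)
--
--     # if seq contains characters not in `translation_from`, then DO NOT
--     # attempt to reverse complement the sequence, just return itself back
--     if set(seq) <= set(translation_from):
--         return seq[::-1].translate(translation_table)
--     else:
--         return seq
--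
-- def rc_tabseparated(tsv_input):
--     output = []
--     for line in tsv_input.splitlines():
--         row = line.strip().split('\t')
--
--         if len(row) > 1:
--             row[1] = rc_single(row[1])
--             output.append('\t'.join(row))
--         else:
--             # if there isn't a second column, skip conversion for the line
--             output.append('\t'.join(row))
--
--     return '\n'.join(output)
-- ===== SOURCE B (Python) =====
-- # B: single-pass reverse-complement via a complement dict with early exit,
-- # replacing A's separate validity scan + reverse/translate passes.
-- COMP = {'A': 'T', 'a': 't', 'T': 'A', 't': 'a', 'G': 'C', 'g': 'c',
--         'C': 'G', 'c': 'g', 'Y': 'R', 'y': 'r', 'R': 'Y', 'r': 'y',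
--         'S': 'S', 's': 's', 'W': 'W', 'w': 'w', 'K': 'M', 'k': 'm',
--         'M': 'K', 'm': 'k', 'B': 'V', 'b': 'v', 'D': 'H', 'd': 'h',
--         'H': 'D', 'h': 'd', 'V': 'B', 'v': 'b', 'N': 'N', 'n': 'n'}
--
--
-- def _rc_single(seq):
--     seq = seq.replace('U', 'T')
--     out = []
--     for ch in reversed(seq):
--         mapped = COMP.get(ch)
--         if mapped is None:
--             # invalid character: leave the (U->T replaced) sequence as-is
--             return seq
--         out.append(mapped)
--     return ''.join(out)
--
--
-- def rc_tabseparated(tsv_input):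
--     lines = []
--     for line in tsv_input.splitlines():
--         cells = line.strip().split('\t')
--         if len(cells) > 1:
--             lines.append('\t'.join([cells[0], _rc_single(cells[1])] + cells[2:]))
--         else:
--             lines.append('\t'.join(cells))
--     return '\n'.join(lines)
-- ===== Notes on version B (the rewrite author's own statement) =====
-- stated objective: alternative
-- what changed: rc_single's separate set-based validity scan followed by reverse+translate is fused into one pass over the reversed sequence with a complement dict and early exit on an invalid character; the per-line column replacement builds the new row by splicing instead of index assignment.
import Mathlib
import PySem

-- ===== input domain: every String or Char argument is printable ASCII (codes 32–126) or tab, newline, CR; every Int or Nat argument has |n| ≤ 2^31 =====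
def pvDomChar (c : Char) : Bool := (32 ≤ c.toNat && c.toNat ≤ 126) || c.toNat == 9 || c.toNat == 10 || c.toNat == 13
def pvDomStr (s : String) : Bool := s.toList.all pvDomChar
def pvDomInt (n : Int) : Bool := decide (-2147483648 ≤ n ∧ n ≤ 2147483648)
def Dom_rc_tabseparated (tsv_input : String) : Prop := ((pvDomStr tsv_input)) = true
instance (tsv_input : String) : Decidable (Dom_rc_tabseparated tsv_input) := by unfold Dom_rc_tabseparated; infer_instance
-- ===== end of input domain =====

-- B fuses A's set-based validity scan + reverse/translate into one pass over the
-- reversed sequence with a complement dict and early exit (objective: alternative).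

-- ===== PORT A =====
def pvTFrom : List Char := "AaTtGgCcYyRrSsWwKkMmBbDdHhVvNn".toList
def pvTTo : List Char := "TtAaCcGgRrYySsWwMmKkVvHhDdBbNn".toList
-- str.maketrans(translation_from, translation_to): pair up the two strings
def pvTable : PySem.Dict Char Char := ⟨pvTFrom.zip pvTTo⟩
-- s.translate(table), ported by hand: exact for a 1-char-to-1-char table —
-- each char is replaced by its mapping, chars absent from the table are kept
def pvTranslate (t : PySem.Dict Char Char) (s : List Char) : List Char :=
  s.map (fun c => (PySem.Dict.get? t c).getD c)

def rc_single (seq : String) : String :=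
  let s := PySem.Str.replace seq "U" "T"
  if PySem.Set.issubset (PySem.Set.ofList s.toList) (PySem.Set.ofList pvTFrom) then
    -- seq[::-1].translate(translation_table)
    String.ofList (pvTranslate pvTable (((PySem.List.slice? s.toList none none (-1)).getD [])))
  else s

def rc_tabseparated (tsv_input : String) : String :=
  PySem.Str.join "\n" ((PySem.Str.splitlines tsv_input).foldl (fun out line =>
    if ((PySem.Str.split? (PySem.Str.strip line) "\t").getD []).length > 1 then
      out ++ [PySem.Str.join "\t" (PySem.List.pySetD ((PySem.Str.split? (PySem.Str.strip line) "\t").getD []) 1 (rc_single (PySem.List.pyGetD ((PySem.Str.split? (PySem.Str.strip line) "\t").getD []) 1 "")))]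
    else
      out ++ [PySem.Str.join "\t" ((PySem.Str.split? (PySem.Str.strip line) "\t").getD [])]) [])

-- ===== PORT B =====
def pvComp : PySem.Dict Char Char :=
  ⟨[('A','T'),('a','t'),('T','A'),('t','a'),('G','C'),('g','c'),
    ('C','G'),('c','g'),('Y','R'),('y','r'),('R','Y'),('r','y'),
    ('S','S'),('s','s'),('W','W'),('w','w'),('K','M'),('k','m'),
    ('M','K'),('m','k'),('B','V'),('b','v'),('D','H'),('d','h'),
    ('H','D'),('h','d'),('V','B'),('v','b'),('N','N'),('n','n')]⟩

-- the single pass of B's rc_single: accumulate mapped chars, none = early return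
def pvGoRC (acc : List Char) : List Char → Option (List Char)
  | [] => some acc
  | c :: rest =>
    match PySem.Dict.get? pvComp c with
    | none => none
    | some v => pvGoRC (acc ++ [v]) rest

def rc_single_alt (seq : String) : String :=
  let s := PySem.Str.replace seq "U" "T"
  match pvGoRC [] s.toList.reverse with
  | some out => String.ofList out
  | none => s

def rc_tabseparated_alt (tsv_input : String) : String :=
  PySem.Str.join "\n" ((PySem.Str.splitlines tsv_input).foldl (fun out line =>
    match (PySem.Str.split? (PySem.Str.strip line) "\t").getD [] with
    | c0 :: c1 :: rest => out ++ [PySem.Str.join "\t" (c0 :: rc_single_alt c1 :: rest)]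
    | row => out ++ [PySem.Str.join "\t" row]) [])

-- ===== PRECONDITION & SPEC =====
def Spec_rc_tabseparated (tsv_input : String) (out : String) : Prop := out = rc_tabseparated_alt tsv_input
instance (tsv_input : String) (out : String) : Decidable (Spec_rc_tabseparated tsv_input out) := by unfold Spec_rc_tabseparated; infer_instance

-- ===== CLAIM (what is proved, stated in full; the proofs are below) =====
def Claim_equal_rc_tabseparated : Prop := ∀ (tsv_input : String), Dom_rc_tabseparated tsv_input → Spec_rc_tabseparated tsv_input (rc_tabseparated tsv_input)

-- ===== LEMMAS AND PROOFS =====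

theorem pvComp_eq_table : pvComp = pvTable :=
  congrArg PySem.Dict.mk (by decide)

theorem pvGoRC_all_some (l : List Char) (h : ∀ c ∈ l, (PySem.Dict.get? pvComp c).isSome)
    (acc : List Char) :
    pvGoRC acc l = some (acc ++ l.map (fun c => (PySem.Dict.get? pvComp c).getD c)) := by
  induction l generalizing acc with
  | nil => simp [pvGoRC]
  | cons c rest ih =>
    have hc := h c (by simp)
    cases hv : PySem.Dict.get? pvComp c with
    | none => simp [hv] at hc
    | some v =>
      simp only [pvGoRC, hv]
      rw [ih (fun d hd => h d (by simp [hd]))]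
      simp [hv]

theorem pvGoRC_none (l : List Char) (c : Char) (hc : c ∈ l)
    (hn : PySem.Dict.get? pvComp c = none) (acc : List Char) :
    pvGoRC acc l = none := by
  induction l generalizing acc with
  | nil => simp at hc
  | cons d rest ih =>
    simp only [pvGoRC]
    rcases List.mem_cons.mp hc with h | h
    · subst h; simp [hn]
    · cases hv : PySem.Dict.get? pvComp d with
      | none => rfl
      | some v => exact ih h _

theorem get?_zip_isSome {α : Type} [BEq α] [LawfulBEq α] (ks vs : List α)
    (h : ks.length = vs.length) (c : α) :
    (PySem.Dict.get? (⟨ks.zip vs⟩ : PySem.Dict α α) c).isSome = true ↔ c ∈ ks := by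
  induction ks generalizing vs with
  | nil => simp [PySem.Dict.get?]
  | cons k kt ih =>
    cases vs with
    | nil => simp at h
    | cons v vt =>
      by_cases hk : k = c
      · subst hk; simp [PySem.Dict.get?]
      · have hkc : (k == c) = false := by simpa using hk
        simp only [PySem.Dict.get?, List.zip_cons_cons, List.find?, hkc, List.mem_cons]
        rw [show (Option.map (fun x : α × α => x.2) (List.find? (fun p => p.1 == c) (kt.zip vt))) =
              PySem.Dict.get? (⟨kt.zip vt⟩ : PySem.Dict α α) c from rfl]
        rw [ih vt (by simpa using h)]
        exact ⟨Or.inr, fun h' => h'.resolve_left (fun e => hk e.symm)⟩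

theorem mem_pvTFrom_iff_isSome (c : Char) :
    c ∈ pvTFrom ↔ (PySem.Dict.get? pvComp c).isSome = true := by
  rw [pvComp_eq_table]
  exact (get?_zip_isSome pvTFrom pvTTo (by decide) c).symm

-- the central fact: the two rc_single implementations agree on every string
theorem rc_single_eq (seq : String) : rc_single seq = rc_single_alt seq := by
  unfold rc_single rc_single_alt
  set s := PySem.Str.replace seq "U" "T" with hs
  by_cases h : ∀ c ∈ s.toList, c ∈ pvTFrom
  · have hsub : PySem.Set.issubset (PySem.Set.ofList s.toList) (PySem.Set.ofList pvTFrom) = true := by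
      rw [PySem.Set.issubset_iff]
      intro x hx
      rw [PySem.Set.mem_ofList] at hx ⊢
      exact h x hx
    have hall : ∀ c ∈ s.toList.reverse, (PySem.Dict.get? pvComp c).isSome := by
      intro c hc
      exact (mem_pvTFrom_iff_isSome c).mp (h c (List.mem_reverse.mp hc))
    simp only [hsub, if_true, PySem.List.slice?_none_none_neg_one, Option.getD_some]
    rw [pvGoRC_all_some _ hall []]
    simp only [List.nil_append]
    unfold pvTranslate
    rw [pvComp_eq_table]
  · simp only [not_forall] at h
    obtain ⟨c, hc, hmem⟩ := h
    have hsub : PySem.Set.issubset (PySem.Set.ofList s.toList) (PySem.Set.ofList pvTFrom) = false := by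
      cases hb : PySem.Set.issubset (PySem.Set.ofList s.toList) (PySem.Set.ofList pvTFrom)
      · rfl
      · exfalso
        have := (PySem.Set.issubset_iff _ _).mp hb c (by rw [PySem.Set.mem_ofList]; exact hc)
        rw [PySem.Set.mem_ofList] at this
        exact hmem this
    have hnone : PySem.Dict.get? pvComp c = none := by
      cases hv : PySem.Dict.get? pvComp c with
      | none => rfl
      | some v =>
        exact absurd ((mem_pvTFrom_iff_isSome c).mpr (by simp [hv])) hmem
    simp only [hsub, Bool.false_eq_true, if_false]
    rw [pvGoRC_none s.toList.reverse c (List.mem_reverse.mpr hc) hnone []]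

-- per-line agreement between the two loop bodies
theorem body_eq (out : List String) (row : List String) :
    (if row.length > 1 then
       out ++ [PySem.Str.join "\t" (PySem.List.pySetD row 1 (rc_single (PySem.List.pyGetD row 1 "")))]
     else out ++ [PySem.Str.join "\t" row]) =
    (match row with
     | c0 :: c1 :: rest => out ++ [PySem.Str.join "\t" (c0 :: rc_single_alt c1 :: rest)]
     | row => out ++ [PySem.Str.join "\t" row]) := by
  match row with
  | [] => simp
  | [c0] => simp
  | c0 :: c1 :: rest =>
    have hlen : (c0 :: c1 :: rest).length > 1 := by simp
    have h1 : PySem.List.pyGetD (c0 :: c1 :: rest) 1 "" = c1 := by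
      have := PySem.List.pyGetD_natCast (xs := c0 :: c1 :: rest) (n := 1) (d := "")
      simpa using this
    have h2 : PySem.List.pySetD (c0 :: c1 :: rest) 1 (rc_single c1) =
        c0 :: rc_single c1 :: rest := by
      have := PySem.List.pySetD_natCast (xs := c0 :: c1 :: rest) (n := 1) (v := rc_single c1)
      simpa using this
    simp only [hlen, if_true]
    rw [h1, h2, rc_single_eq]

-- ===== VERDICT (by name: the statement is the Claim_ definition above) =====
theorem rc_tabseparated_spec : Claim_equal_rc_tabseparated := by
  unfold Claim_equal_rc_tabseparated
  intro tsv_input _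
  unfold Spec_rc_tabseparated rc_tabseparated rc_tabseparated_alt
  refine congrArg (PySem.Str.join "\n") ?_
  apply PySem.List.foldl_congr_mem
  intro out line _
  exact body_eq out ((PySem.Str.split? (PySem.Str.strip line) "\t").getD [])
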